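-- pv_equiv track=rewrite | github.com/Qiskit/qiskit-addon-cutting | circuit_knitting/cutting/cutqc/wire_cutting_evaluation.py | measure_state
-- ===== SOURCE A (Python) =====
-- from typing import Sequence, Any
--
-- def measure_state(full_state: int, meas: tuple[Any, ...]) -> tuple[int, int]:
--     """
--     Compute the corresponding effective_state for the given full_state.
--
--     Measured in basis `meas`. Returns sigma (int), effective_state (int) where sigma = +-1
--
--     Args:
--         full_state: The current state (in decimal form)
--         meas: The measurement bases
--
--     Returns:
--         Sigma (defined by the parity of non computational basis 1 measurements) and
--         the effective state (defined by the measurements in the computational basis)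
--     """
--     bin_full_state = bin(full_state)[2:].zfill(len(meas))
--     sigma = 1
--     bin_effective_state = ""
--     for meas_bit, meas_basis in zip(bin_full_state, meas[::-1]):
--         if meas_bit == "1" and meas_basis != "I" and meas_basis != "comp":
--             sigma *= -1
--         if meas_basis == "comp":
--             bin_effective_state += meas_bit
--     effective_state = int(bin_effective_state, 2) if bin_effective_state != "" else 0
--
--     return sigma, effective_state
-- ===== SOURCE B (Python) =====
-- def _parity(x):
--     p = 0
--     while x:
--         p ^= x & 1
--         x >>= 1
--     return p
--
--
-- def _pext(value, mask):
--     out = 0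
--     pos = 0
--     while mask:
--         if mask & 1:
--             out |= (value & 1) << pos
--             pos += 1
--         value >>= 1
--         mask >>= 1
--     return out
--
--
-- def measure_state(full_state, meas):
--     n = len(meas)
--     shift = max(full_state.bit_length() - n, 0)
--     window = full_state >> shift
--     comp_mask = 0
--     flip_mask = 0
--     for basis in reversed(meas):
--         comp_mask = 2 * comp_mask + (1 if basis == "comp" else 0)
--         flip_mask = 2 * flip_mask + (1 if basis != "I" and basis != "comp" else 0)
--     sigma = -1 if _parity(window & flip_mask) else 1
--     effective_state = _pext(window, comp_mask)
--     return sigma, effective_state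
-- ===== Notes on version B (the rewrite author's own statement) =====
-- stated objective: alternative
-- what changed: B is a staged bit-parallel algorithm: it first compiles the measurement bases into two integer bitmasks (comp positions, sign-flip positions), then gets sigma as the parity of popcount(window & flip_mask) and the effective state as a parallel-bit-extract (pext) of the window by comp_mask, instead of A's single zip loop over a zero-padded binary string that builds and reparses a substring with int(...,2).
-- outside the precondition, e.g. on measure_state(-1, ('X', 'Y')): A returns (-1, 0), B returns (1, 0); on measure_state(-5, ('X', 'comp')): A raises ValueError, B returns (-1, 0)
import Mathlib
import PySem

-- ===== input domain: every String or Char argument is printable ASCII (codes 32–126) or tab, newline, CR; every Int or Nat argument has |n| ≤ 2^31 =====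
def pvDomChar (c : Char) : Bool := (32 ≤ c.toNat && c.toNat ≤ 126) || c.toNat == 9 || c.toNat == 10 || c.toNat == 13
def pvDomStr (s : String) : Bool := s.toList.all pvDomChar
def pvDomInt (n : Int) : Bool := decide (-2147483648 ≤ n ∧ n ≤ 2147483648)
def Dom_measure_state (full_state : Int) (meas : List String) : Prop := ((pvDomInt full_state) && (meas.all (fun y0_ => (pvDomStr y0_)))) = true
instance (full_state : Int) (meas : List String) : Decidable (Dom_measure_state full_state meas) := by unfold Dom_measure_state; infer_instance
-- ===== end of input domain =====

-- B replaces A's binary-string zip loop by a staged bit-parallel algorithm (basis bitmasks,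
-- parity of window&flip_mask, parallel bit extract by comp_mask); proved for nonnegative full_state.


-- ===== PORT A =====
-- bin(m) for a natural number m, without the '0b' prefix (most-significant bit first)
def pvBinNat (m : Nat) : List Char :=
  if _h : m < 2 then [if m = 1 then '1' else '0']
  else pvBinNat (m / 2) ++ [if m % 2 = 1 then '1' else '0']
decreasing_by exact Nat.div_lt_self (by omega) (by omega)

-- bin(full_state)[2:] : for negative ints Python's '-0b...'[2:] keeps the 'b'
def pvPyBin (full_state : Int) : List Char :=
  if full_state < 0 then 'b' :: pvBinNat full_state.natAbs else pvBinNat full_state.toNat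

-- s.zfill(n) (our strings never carry a leading sign character)
def pvZfill (s : List Char) (n : Nat) : List Char := List.replicate (n - s.length) '0' ++ s

-- int(s, 2): exact on strings of '0'/'1' chars — the only ones reaching it inside Pre_
-- (Python raises ValueError on the 'b' a negative full_state can contribute; excluded by Pre_)
def pvParseBin (s : List Char) : Int := s.foldl (fun a c => 2 * a + (if c = '1' then 1 else 0)) 0

def measure_state (full_state : Int) (meas : List String) : Int × Int :=
  let bin_full_state := pvZfill (pvPyBin full_state) meas.length
  let r := (bin_full_state.zip meas.reverse).foldl
    (fun (st : Int × List Char) p =>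
      let sigma := if p.1 = '1' ∧ p.2 ≠ "I" ∧ p.2 ≠ "comp" then -st.1 else st.1
      let eff := if p.2 = "comp" then st.2 ++ [p.1] else st.2
      (sigma, eff)) (1, [])
  (r.1, if r.2 = [] then 0 else pvParseBin r.2)

-- ===== PORT B =====
-- int.bit_length() for a natural number
def pvBitLen (m : Nat) : Nat :=
  if _h : m = 0 then 0 else pvBitLen (m / 2) + 1
decreasing_by exact Nat.div_lt_self (by omega) (by omega)

-- _parity: the while loop of Source B as structural recursion on x (low bit first, xor-accumulated)
def pvParity (x : Nat) : Nat :=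
  if _h : x = 0 then 0 else pvParity (x / 2) ^^^ (x % 2)
decreasing_by exact Nat.div_lt_self (by omega) (by omega)

-- _pext: Source B's while loop over the mask bits as structural recursion on mask
def pvPext (value mask : Nat) : Nat :=
  if _h : mask = 0 then 0
  else if mask % 2 = 1 then value % 2 + 2 * pvPext (value / 2) (mask / 2)
  else pvPext (value / 2) (mask / 2)
decreasing_by all_goals exact Nat.div_lt_self (by omega) (by omega)

def measure_state_alt (full_state : Int) (meas : List String) : Int × Int :=
  let n := meas.length
  let m := full_state.toNat           -- exact for nonnegative full_state (all of Pre_)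
  let shift := pvBitLen m - n         -- Nat subtraction = Python's max(bit_length - n, 0)
  let window := m >>> shift
  let masks := meas.reverse.foldl     -- the 'for basis in reversed(meas)' mask-building pass
    (fun (st : Nat × Nat) basis =>
      (2 * st.1 + (if basis = "comp" then 1 else 0),
       2 * st.2 + (if basis ≠ "I" ∧ basis ≠ "comp" then 1 else 0)))
    (0, 0)
  -- '-1 if _parity(...) else 1': _parity returns 0 or 1, so truthiness is '= 1'
  let sigma : Int := if pvParity (window &&& masks.2) = 1 then -1 else 1
  (sigma, Int.ofNat (pvPext window masks.1))

-- ===== PRECONDITION & SPEC =====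
-- Pre_ restricts to the function's natural domain of nonnegative states: on negative
-- full_state (malformed input) A processes the 'b' of Python's '-0b...' sign form,
-- raising ValueError when it reaches a 'comp' position and otherwise returning an
-- artefact of comparing that character, which B does not mimic.
def Pre_measure_state (full_state : Int) (meas : List String) : Prop := 0 ≤ full_state
instance (full_state : Int) (meas : List String) : Decidable (Pre_measure_state full_state meas) := by unfold Pre_measure_state; infer_instance
def pvWitness_measure_state : Int × List String := (5, ["comp", "X", "comp"])

def Spec_measure_state (full_state : Int) (meas : List String) (out : Int × Int) : Prop := out = measure_state_alt full_state meas
instance (full_state : Int) (meas : List String) (out : Int × Int) : Decidable (Spec_measure_state full_state meas out) := by unfold Spec_measure_state; infer_instance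

-- ===== CLAIM (what is proved, stated in full; the proofs are below) =====
def Claim_equal_measure_state : Prop := ∀ (full_state : Int) (meas : List String), Dom_measure_state full_state meas → Pre_measure_state full_state meas → Spec_measure_state full_state meas (measure_state full_state meas)

-- ===== LEMMAS AND PROOFS =====

-- Common reference: one structural recursion over meas (head = bit 0 of the window,
-- processed last), to which both ports are reduced.
def pvRef : Nat → List String → Int × Int
  | _, [] => (1, 0)
  | w, b :: ms =>
    let r := pvRef (w / 2) ms
    (if Int.ofNat (w % 2) = 1 ∧ b ≠ "I" ∧ b ≠ "comp" then -r.1 else r.1,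
     if b = "comp" then 2 * r.2 + Int.ofNat (w % 2) else r.2)

-- the mask-building pass, rephrased as a foldr (= structural recursion on meas)
def pvMaskRec (meas : List String) : Nat × Nat :=
  meas.foldr
    (fun basis st =>
      (2 * st.1 + (if basis = "comp" then 1 else 0),
       2 * st.2 + (if basis ≠ "I" ∧ basis ≠ "comp" then 1 else 0)))
    (0, 0)

-- ---- A-side lemmas (binary string characterization) ----

lemma pvBinNat_lt (m : Nat) : m < 2 ^ (pvBinNat m).length := by
  induction m using Nat.strong_induction_on with
  | _ m ih =>
    rw [pvBinNat]
    by_cases h : m < 2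
    · rw [dif_pos h]; simp; omega
    · have ih' := ih (m / 2) (Nat.div_lt_self (by omega) (by omega))
      rw [dif_neg h]
      simp [pow_succ]
      omega

lemma pvBinNat_rev_getD (m j : Nat) :
    (pvBinNat m).reverse.getD j '0' = (if (m >>> j) % 2 = 1 then '1' else '0') := by
  induction m using Nat.strong_induction_on generalizing j with
  | _ m ih =>
    rw [pvBinNat]
    by_cases h : m < 2
    · rw [dif_pos h]
      cases j with
      | zero =>
        simp only [Nat.shiftRight_zero, List.reverse_singleton, List.getD_cons_zero]
        interval_cases m <;> rfl
      | succ j =>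
        have hz : m >>> (j+1) = 0 := by
          rw [Nat.shiftRight_eq_div_pow]
          have : 2 ≤ 2 ^ (j+1) := by
            have := Nat.one_lt_two_pow (n := j+1) (by omega); omega
          exact Nat.div_eq_of_lt (by omega)
        simp [hz, List.getD]
    · have hrec := ih (m / 2) (Nat.div_lt_self (by omega) (by omega))
      rw [dif_neg h, List.reverse_append, List.reverse_singleton, List.singleton_append]
      cases j with
      | zero =>
        simp only [List.getD_cons_zero, Nat.shiftRight_zero]
        rfl
      | succ j =>
        rw [List.getD_cons_succ, hrec j]
        have hs : m >>> (j+1) = (m / 2) >>> j := by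
          rw [Nat.shiftRight_eq_div_pow, Nat.shiftRight_eq_div_pow, pow_succ]
          rw [Nat.div_div_eq_div_mul, Nat.mul_comm, ← Nat.div_div_eq_div_mul]
        rw [hs]

lemma pvZfill_rev_getD (m n j : Nat) :
    (pvZfill (pvBinNat m) n).reverse.getD j '0' = (if (m >>> j) % 2 = 1 then '1' else '0') := by
  unfold pvZfill
  rw [List.reverse_append, List.reverse_replicate]
  by_cases hj : j < (pvBinNat m).reverse.length
  · rw [List.getD_append _ _ _ _ hj, pvBinNat_rev_getD]
  · have hlen : (pvBinNat m).length ≤ j := by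
      simp only [List.length_reverse] at hj; omega
    have hz : m >>> j = 0 := by
      rw [Nat.shiftRight_eq_div_pow]
      exact Nat.div_eq_of_lt (lt_of_lt_of_le (pvBinNat_lt m) (Nat.pow_le_pow_right (by omega) hlen))
    rw [hz, if_neg (by omega : ¬ ((0:Nat) % 2 = 1))]
    rw [List.getD_append_right _ _ _ _ (by simp only [List.length_reverse]; exact hlen)]
    simp [List.getD, List.getElem?_replicate]
    split <;> rfl

lemma pvBinNat_length (m : Nat) (hm : m ≠ 0) : (pvBinNat m).length = pvBitLen m := by
  induction m using Nat.strong_induction_on with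
  | _ m ih =>
    rw [pvBinNat, pvBitLen]
    by_cases h : m < 2
    · have : m = 1 := by omega
      subst this
      rw [dif_pos h, dif_neg (by omega : ¬ (1 = 0))]
      rw [pvBitLen]
      simp
    · have h2 : m / 2 ≠ 0 := by omega
      have := ih (m / 2) (Nat.div_lt_self (by omega) (by omega)) h2
      rw [dif_neg h, dif_neg hm]
      simp [this]

lemma pvBinNat_zero_length : (pvBinNat 0).length = 1 := by rw [pvBinNat]; simp

lemma pvGetD_eq_rev_getD (s : List Char) (i : Nat) (hi : i < s.length) :
    s.getD i '0' = s.reverse.getD (s.length - 1 - i) '0' := by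
  rw [List.getD_eq_getElem _ _ hi, List.getD_eq_getElem _ _ (by simp; omega)]
  rw [List.getElem_reverse]
  congr 1
  omega

lemma pvZip_eq_map_range (s : List Char) (meas : List String) (h : meas.length ≤ s.length) :
    s.zip meas.reverse =
      (List.range meas.length).map
        (fun i => (s.getD i '0', meas.getD (meas.length - 1 - i) "")) := by
  apply List.ext_getElem
  · simp; omega
  · intro i h1 h2
    simp only [List.getElem_zip, List.getElem_map, List.getElem_range]
    have hi : i < meas.length := by simp at h2; omega
    rw [List.getElem_reverse, List.getD_eq_getElem _ _ (by omega),
        List.getD_eq_getElem _ _ (by omega)]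

lemma pvFold_sim {α β γ : Type} (R : α → β → Prop) (P : γ → Prop)
    (fA : α → γ → α) (fB : β → γ → β)
    (hstep : ∀ i, P i → ∀ x y, R x y → R (fA x i) (fB y i)) :
    ∀ (l : List γ), (∀ i ∈ l, P i) → ∀ a b, R a b → R (l.foldl fA a) (l.foldl fB b) := by
  intro l
  induction l with
  | nil => intro _ a b hab; exact hab
  | cons hd tl ih =>
    intro hl a b hab
    exact ih (fun i h => hl i (List.mem_cons_of_mem _ h)) _ _
      (hstep hd (hl hd List.mem_cons_self) a b hab)

lemma pvParseBin_append (t : List Char) (c : Char) :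
    pvParseBin (t ++ [c]) = 2 * pvParseBin t + (if c = '1' then 1 else 0) := by
  simp [pvParseBin, List.foldl_append]

lemma pvIf_nil_parse (t : List Char) :
    (if t = [] then (0 : Int) else pvParseBin t) = pvParseBin t := by
  split
  · subst ‹t = []›; rfl
  · rfl

-- A equals the indexed range fold over the window bits
lemma pvA_eq_rangefold (fs : Int) (meas : List String) (hpre : 0 ≤ fs) :
    measure_state fs meas =
      (List.range meas.length).foldl
        (fun (st : Int × Int) i =>
          (if Int.ofNat ((fs.toNat >>> (max meas.length (pvBitLen fs.toNat) - 1 - i)) % 2) = 1 ∧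
                meas.getD (meas.length - 1 - i) "" ≠ "I" ∧
                meas.getD (meas.length - 1 - i) "" ≠ "comp"
            then -st.1 else st.1,
           if meas.getD (meas.length - 1 - i) "" = "comp"
            then 2 * st.2 + Int.ofNat ((fs.toNat >>> (max meas.length (pvBitLen fs.toNat) - 1 - i)) % 2)
            else st.2)) (1, 0) := by
  by_cases hnil : meas = []
  · subst hnil
    simp [measure_state]
  · have hfs : pvPyBin fs = pvBinNat fs.toNat := if_neg (not_lt.mpr hpre)
    have hn1 : 0 < meas.length := List.length_pos_of_ne_nil hnil
    have hslen : meas.length ≤ (pvZfill (pvBinNat fs.toNat) meas.length).length := by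
      simp [pvZfill]; omega
    have hLB : (pvZfill (pvBinNat fs.toNat) meas.length).length
        = max meas.length (pvBitLen fs.toNat) := by
      simp only [pvZfill, List.length_append, List.length_replicate]
      by_cases hm0 : fs.toNat = 0
      · rw [hm0]
        have h1 := pvBinNat_zero_length
        have h2 : pvBitLen 0 = 0 := by rw [pvBitLen]; simp
        omega
      · have := pvBinNat_length _ hm0
        omega
    have hsval : ∀ i, i < meas.length →
        (pvZfill (pvBinNat fs.toNat) meas.length).getD i '0' =
          (if (fs.toNat >>> (max meas.length (pvBitLen fs.toNat) - 1 - i)) % 2 = 1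
            then '1' else '0') := by
      intro i hi
      rw [pvGetD_eq_rev_getD _ i (lt_of_lt_of_le hi hslen), pvZfill_rev_getD, hLB]
    simp only [measure_state, hfs]
    rw [pvZip_eq_map_range _ meas hslen, List.foldl_map]
    have key := pvFold_sim
      (fun (x : Int × List Char) (y : Int × Int) => x.1 = y.1 ∧ pvParseBin x.2 = y.2)
      (fun i => i < meas.length)
      (fun (st : Int × List Char) (i : Nat) =>
        (if (pvZfill (pvBinNat fs.toNat) meas.length).getD i '0' = '1' ∧
              meas.getD (meas.length - 1 - i) "" ≠ "I" ∧
              meas.getD (meas.length - 1 - i) "" ≠ "comp"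
          then -st.1 else st.1,
         if meas.getD (meas.length - 1 - i) "" = "comp"
          then st.2 ++ [(pvZfill (pvBinNat fs.toNat) meas.length).getD i '0'] else st.2))
      (fun (st : Int × Int) (i : Nat) =>
        (if Int.ofNat ((fs.toNat >>> (max meas.length (pvBitLen fs.toNat) - 1 - i)) % 2) = 1 ∧
              meas.getD (meas.length - 1 - i) "" ≠ "I" ∧
              meas.getD (meas.length - 1 - i) "" ≠ "comp"
          then -st.1 else st.1,
         if meas.getD (meas.length - 1 - i) "" = "comp"
          then 2 * st.2 + Int.ofNat ((fs.toNat >>> (max meas.length (pvBitLen fs.toNat) - 1 - i)) % 2)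
          else st.2))
      (by
        intro i hi x y hxy
        rcases Nat.mod_two_eq_zero_or_one
            (fs.toNat >>> (max meas.length (pvBitLen fs.toNat) - 1 - i)) with hb | hb
        · have hv : (pvZfill (pvBinNat fs.toNat) meas.length).getD i '0' = '0' := by
            rw [hsval i hi, if_neg (by omega)]
          refine ⟨?_, ?_⟩
          · have hv2 := hv
            simp only [List.getD_eq_getElem?_getD] at hv2
            simp [hv2, hb, hxy.1]
          · simp only []
            split_ifs with hcomp
            · rw [pvParseBin_append, hxy.2, hv, hb]
              norm_num
              decide
            · exact hxy.2
        · have hv : (pvZfill (pvBinNat fs.toNat) meas.length).getD i '0' = '1' := by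
            rw [hsval i hi, if_pos hb]
          refine ⟨?_, ?_⟩
          · have hv2 := hv
            simp only [List.getD_eq_getElem?_getD] at hv2
            simp [hv2, hb, hxy.1]
          · simp only []
            split_ifs with hcomp
            · rw [pvParseBin_append, hxy.2, hv, hb]; norm_num
            · exact hxy.2)
      (List.range meas.length) (fun i h => List.mem_range.mp h)
      (1, ([] : List Char)) ((1 : Int), (0 : Int)) ⟨rfl, rfl⟩
    rw [Prod.ext_iff]
    refine ⟨key.1, ?_⟩
    rw [pvIf_nil_parse]
    exact key.2

-- the zero-padded string position Lmax-1-i reads bit n-1-i of the window m >>> (bitlen - n)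
lemma pvLmax_to_w (fs : Int) (meas : List String) :
    (List.range meas.length).foldl
      (fun (st : Int × Int) i =>
        (if Int.ofNat ((fs.toNat >>> (max meas.length (pvBitLen fs.toNat) - 1 - i)) % 2) = 1 ∧
              meas.getD (meas.length - 1 - i) "" ≠ "I" ∧
              meas.getD (meas.length - 1 - i) "" ≠ "comp"
          then -st.1 else st.1,
         if meas.getD (meas.length - 1 - i) "" = "comp"
          then 2 * st.2 + Int.ofNat ((fs.toNat >>> (max meas.length (pvBitLen fs.toNat) - 1 - i)) % 2)
          else st.2)) (1, 0)
    = (List.range meas.length).foldl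
      (fun (st : Int × Int) i =>
        (if Int.ofNat (((fs.toNat >>> (pvBitLen fs.toNat - meas.length)) >>> (meas.length - 1 - i)) % 2) = 1 ∧
              meas.getD (meas.length - 1 - i) "" ≠ "I" ∧
              meas.getD (meas.length - 1 - i) "" ≠ "comp"
          then -st.1 else st.1,
         if meas.getD (meas.length - 1 - i) "" = "comp"
          then 2 * st.2 + Int.ofNat (((fs.toNat >>> (pvBitLen fs.toNat - meas.length)) >>> (meas.length - 1 - i)) % 2)
          else st.2)) (1, 0) := by
  apply PySem.List.foldl_congr_mem
  intro acc i hi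
  have hilt : i < meas.length := List.mem_range.mp hi
  have hshift : fs.toNat >>> (max meas.length (pvBitLen fs.toNat) - 1 - i)
      = (fs.toNat >>> (pvBitLen fs.toNat - meas.length)) >>> (meas.length - 1 - i) := by
    rw [← Nat.shiftRight_add]
    congr 1
    omega
  simp only [hshift]

-- the indexed range fold is the structural recursion pvRef
lemma pvRangefold_eq_ref (meas : List String) : ∀ w : Nat,
    (List.range meas.length).foldl
      (fun (st : Int × Int) i =>
        (if Int.ofNat ((w >>> (meas.length - 1 - i)) % 2) = 1 ∧
              meas.getD (meas.length - 1 - i) "" ≠ "I" ∧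
              meas.getD (meas.length - 1 - i) "" ≠ "comp"
          then -st.1 else st.1,
         if meas.getD (meas.length - 1 - i) "" = "comp"
          then 2 * st.2 + Int.ofNat ((w >>> (meas.length - 1 - i)) % 2)
          else st.2)) (1, 0) = pvRef w meas := by
  induction meas with
  | nil => intro w; simp [pvRef]
  | cons b ms ih =>
    intro w
    rw [List.length_cons, List.range_succ, List.foldl_append]
    have hcongr :
        (List.range ms.length).foldl
          (fun (st : Int × Int) i =>
            (if Int.ofNat ((w >>> (ms.length + 1 - 1 - i)) % 2) = 1 ∧
                  (b :: ms).getD (ms.length + 1 - 1 - i) "" ≠ "I" ∧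
                  (b :: ms).getD (ms.length + 1 - 1 - i) "" ≠ "comp"
              then -st.1 else st.1,
             if (b :: ms).getD (ms.length + 1 - 1 - i) "" = "comp"
              then 2 * st.2 + Int.ofNat ((w >>> (ms.length + 1 - 1 - i)) % 2)
              else st.2)) (1, 0)
        = pvRef (w / 2) ms := by
      rw [← ih (w / 2)]
      apply PySem.List.foldl_congr_mem
      intro acc i hi
      have hilt : i < ms.length := List.mem_range.mp hi
      have h1 : ms.length + 1 - 1 - i = (ms.length - 1 - i) + 1 := by omega
      have h2 : w >>> ((ms.length - 1 - i) + 1) = (w / 2) >>> (ms.length - 1 - i) := by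
        rw [Nat.add_comm, Nat.shiftRight_add, Nat.shiftRight_one]
      rw [h1, h2, List.getD_cons_succ]
    rw [hcongr]
    have h0 : ms.length + 1 - 1 - ms.length = 0 := by omega
    simp only [List.foldl_cons, List.foldl_nil, h0, Nat.shiftRight_zero, List.getD_cons_zero]
    simp [pvRef]

-- ---- B-side lemmas ----

lemma pvParity_zero : pvParity 0 = 0 := by rw [pvParity]; simp

lemma pvParity_step (x : Nat) : pvParity x = pvParity (x / 2) ^^^ (x % 2) := by
  by_cases h : x = 0
  · subst h
    simp [pvParity_zero]
  · rw [pvParity, dif_neg h]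

lemma pvParity_le_one (x : Nat) : pvParity x ≤ 1 := by
  induction x using Nat.strong_induction_on with
  | _ x ih =>
    by_cases h : x = 0
    · subst h; simp [pvParity_zero]
    · rw [pvParity, dif_neg h]
      have h1 := ih (x / 2) (Nat.div_lt_self (by omega) (by omega))
      have e0 : pvParity (x / 2) = 0 ∨ pvParity (x / 2) = 1 := by omega
      have e1 : x % 2 = 0 ∨ x % 2 = 1 := by omega
      rcases e0 with h0 | h0 <;> rcases e1 with h3 | h3 <;> rw [h0, h3] <;> decide

-- the sign combination step, with everything already reduced to 0/1 literals
lemma pvSig_combine (p w2 : Nat) (b : String) (hp : p ≤ 1) (hw : w2 ≤ 1) :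
    (if p ^^^ w2 * (if b ≠ "I" ∧ b ≠ "comp" then 1 else 0) = 1 then (-1 : Int) else 1)
      = if Int.ofNat w2 = 1 ∧ b ≠ "I" ∧ b ≠ "comp"
          then -(if p = 1 then (-1 : Int) else 1) else (if p = 1 then (-1 : Int) else 1) := by
  by_cases hc : b ≠ "I" ∧ b ≠ "comp" <;>
    interval_cases p <;> interval_cases w2 <;> simp [hc]

lemma pvPext_step (w cm c0 : Nat) (h : c0 ≤ 1) :
    pvPext w (2 * cm + c0) =
      if c0 = 1 then w % 2 + 2 * pvPext (w / 2) cm else pvPext (w / 2) cm := by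
  rw [pvPext]
  by_cases hz : 2 * cm + c0 = 0
  · have hc : c0 = 0 := by omega
    have hcm : cm = 0 := by omega
    rw [dif_pos hz, hc, hcm]
    rw [pvPext]
    simp
  · rw [dif_neg hz]
    have hm : (2 * cm + c0) % 2 = c0 := by omega
    have hd : (2 * cm + c0) / 2 = cm := by omega
    rw [hm, hd]

lemma pvLand_mod_two (a b : Nat) : (a &&& b) % 2 = a % 2 * (b % 2) := by
  have h : (a &&& b).testBit 0 = (a.testBit 0 && b.testBit 0) := Nat.testBit_and a b 0
  simp only [Nat.testBit_zero] at h
  rcases Nat.mod_two_eq_zero_or_one a with ha | ha <;>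
    rcases Nat.mod_two_eq_zero_or_one b with hb | hb <;>
      rcases Nat.mod_two_eq_zero_or_one (a &&& b) with hc | hc <;>
        simp [ha, hb, hc] at h ⊢

lemma pvLand_div_two (a b : Nat) : (a &&& b) / 2 = a / 2 &&& b / 2 := by
  apply Nat.eq_of_testBit_eq
  intro i
  rw [Nat.testBit_div_two, Nat.testBit_and, Nat.testBit_and, Nat.testBit_div_two,
    Nat.testBit_div_two]

lemma pvMaskRec_cons (b : String) (ms : List String) :
    pvMaskRec (b :: ms) =
      (2 * (pvMaskRec ms).1 + (if b = "comp" then 1 else 0),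
       2 * (pvMaskRec ms).2 + (if b ≠ "I" ∧ b ≠ "comp" then 1 else 0)) := by
  simp [pvMaskRec]

-- B's staged computation equals the structural recursion pvRef
lemma pvB_eq_ref (meas : List String) : ∀ w : Nat,
    ((if pvParity (w &&& (pvMaskRec meas).2) = 1 then (-1 : Int) else 1),
      Int.ofNat (pvPext w (pvMaskRec meas).1)) = pvRef w meas := by
  induction meas with
  | nil =>
    intro w
    have h1 : pvMaskRec [] = (0, 0) := rfl
    rw [h1]
    have h2 : w &&& 0 = 0 := Nat.and_zero w
    rw [h2]
    have h4 : pvPext w 0 = 0 := by rw [pvPext]; simp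
    simp [pvParity_zero, h4, pvRef]
  | cons b ms ih =>
    intro w
    rw [pvMaskRec_cons]
    simp only []
    have hihe : Int.ofNat (pvPext (w / 2) (pvMaskRec ms).1) = (pvRef (w / 2) ms).2 :=
      congrArg Prod.snd (ih (w / 2))
    have hihs : (if pvParity ((w / 2) &&& (pvMaskRec ms).2) = 1 then (-1 : Int) else 1)
        = (pvRef (w / 2) ms).1 := congrArg Prod.fst (ih (w / 2))
    have heff : Int.ofNat (pvPext w (2 * (pvMaskRec ms).1 + (if b = "comp" then 1 else 0)))
        = (if b = "comp" then 2 * (pvRef (w / 2) ms).2 + Int.ofNat (w % 2)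
           else (pvRef (w / 2) ms).2) := by
      rw [pvPext_step _ _ _ (by split <;> omega)]
      by_cases hb : b = "comp"
      · simp only [hb, if_true]
        simp only [Int.ofNat_eq_natCast] at hihe ⊢
        push_cast at hihe ⊢
        omega
      · have hc0 : (if b = "comp" then (1 : Nat) else 0) = 0 := if_neg hb
        rw [hc0, if_neg (by omega : ¬ (0 : Nat) = 1), if_neg hb]
        exact hihe
    have hsig : (if pvParity (w &&& (2 * (pvMaskRec ms).2 + (if b ≠ "I" ∧ b ≠ "comp" then 1 else 0))) = 1
          then (-1 : Int) else 1)
        = (if Int.ofNat (w % 2) = 1 ∧ b ≠ "I" ∧ b ≠ "comp" then -(pvRef (w / 2) ms).1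
           else (pvRef (w / 2) ms).1) := by
      have hf0le : (if b ≠ "I" ∧ b ≠ "comp" then (1 : Nat) else 0) ≤ 1 := by split <;> omega
      have hd : (2 * (pvMaskRec ms).2 + (if b ≠ "I" ∧ b ≠ "comp" then (1 : Nat) else 0)) / 2
          = (pvMaskRec ms).2 := by omega
      have hm : (2 * (pvMaskRec ms).2 + (if b ≠ "I" ∧ b ≠ "comp" then (1 : Nat) else 0)) % 2
          = (if b ≠ "I" ∧ b ≠ "comp" then (1 : Nat) else 0) := by omega
      rw [pvParity_step, pvLand_div_two, pvLand_mod_two, hd, hm,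
        pvSig_combine _ _ b (pvParity_le_one _) (by omega), hihs]
    rw [heff, hsig]
    simp [pvRef]

-- the reverse foldl of the port equals pvMaskRec
lemma pvMasks_eq (meas : List String) :
    meas.reverse.foldl
      (fun (st : Nat × Nat) basis =>
        (2 * st.1 + (if basis = "comp" then 1 else 0),
         2 * st.2 + (if basis ≠ "I" ∧ basis ≠ "comp" then 1 else 0)))
      (0, 0) = pvMaskRec meas := by
  rw [List.foldl_reverse]
  rfl

-- ===== VERDICT (by name: the statement is the Claim_ definition above) =====
theorem measure_state_spec : Claim_equal_measure_state := by
  unfold Claim_equal_measure_state Spec_measure_state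
  intro fs meas _ hpre
  rw [pvA_eq_rangefold fs meas hpre, pvLmax_to_w, pvRangefold_eq_ref]
  simp only [measure_state_alt]
  rw [pvMasks_eq, pvB_eq_ref]
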